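-- pv_equiv track=rewrite | github.com/KaceyLeavitt/Tetrahedra_Integration | random_tests.py | cluster_tetrahedra_by_point
-- ===== SOURCE A (Python) =====
-- def cluster_tetrahedra_by_point(tetrahedra_quadruples, k):
--     """For each k point in the grid, this function generates a list of
--     tetrahedra indices for each tetrahedron containing the k point.
--
--     Args:
--         tetrahedra_quadruples (list of lists of ints): a list of quadruples.
--             There is exactly one quadruple for every tetrahedron. Each
--             quadruple is a list of the grid_points indices for the corners of
--             the tetrahedron.
--         k (int): the total number of points in the grid.
--
--     Returns:
--         tetrahedra_by_point (list of list of ints): for each k point in the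
--             grid, a list of the indices of each tetrahedron containing that
--             k point is given.
--     """
--
--     tetrahedra_by_point = []
--     """list of list of ints: for each k point in the grid, a list of the
--     indices of each tetrahedron containing that k point is given."""
--
--     for m in range(k):
--         adjacent_tetrahedra = []
--         """list of ints: the indices of each tetrahedron containing the given k point in the grid."""
--
--         # find all tetrahedra containing the k point
--         for n in range(len(tetrahedra_quadruples)):
--             for l in range(4):
--                 if tetrahedra_quadruples[n][l] == m + 1:
--                     adjacent_tetrahedra.append(n + 1)
--
--         tetrahedra_by_point.append(adjacent_tetrahedra)
--
--     return tetrahedra_by_point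
-- ===== SOURCE B (Python) =====
-- def cluster_tetrahedra_by_point(tetrahedra_quadruples, k):
--     buckets = [[] for _ in range(k)]
--     for n, quad in enumerate(tetrahedra_quadruples, start=1):
--         for v in quad[:4]:
--             if 1 <= v <= k:
--                 buckets[v - 1].append(n)
--     return buckets
-- ===== Notes on version B (the rewrite author's own statement) =====
-- stated objective: faster
-- what changed: Replaced the O(k*T) rescan of all tetrahedra for every grid point by a single O(T+k) bucketing pass that appends each tetrahedron index to the bucket of each of its four corners.
import Mathlib
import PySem

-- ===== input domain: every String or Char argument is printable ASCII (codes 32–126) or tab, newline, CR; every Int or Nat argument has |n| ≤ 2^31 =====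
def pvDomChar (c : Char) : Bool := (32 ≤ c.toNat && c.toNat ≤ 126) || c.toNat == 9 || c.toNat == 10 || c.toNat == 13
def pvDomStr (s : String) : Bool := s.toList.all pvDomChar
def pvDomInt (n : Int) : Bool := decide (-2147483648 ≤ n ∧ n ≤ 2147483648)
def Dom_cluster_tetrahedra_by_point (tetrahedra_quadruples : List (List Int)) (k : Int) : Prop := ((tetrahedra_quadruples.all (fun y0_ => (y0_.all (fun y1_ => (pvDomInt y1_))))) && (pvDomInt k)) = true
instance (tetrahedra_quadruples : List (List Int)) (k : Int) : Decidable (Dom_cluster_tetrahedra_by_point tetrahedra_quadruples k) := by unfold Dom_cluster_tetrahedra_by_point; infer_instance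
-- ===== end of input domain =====

-- B replaces A's per-grid-point rescan of all tetrahedra by a single bucketing pass
-- over the tetrahedra (objective: faster).

-- ===== PORT A =====
def cluster_tetrahedra_by_point (tetrahedra_quadruples : List (List Int)) (k : Int) : List (List Int) :=
  (PySem.List.pyRange 0 k 1).foldl (fun tetrahedra_by_point m =>
    tetrahedra_by_point ++
      [(PySem.List.pyRange 0 (tetrahedra_quadruples.length : Int) 1).foldl (fun adjacent_tetrahedra n =>
        (PySem.List.pyRange 0 4 1).foldl (fun adjacent_tetrahedra l =>
          if PySem.List.pyGetD (PySem.List.pyGetD tetrahedra_quadruples n []) l 0 = m + 1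
          then adjacent_tetrahedra ++ [n + 1] else adjacent_tetrahedra)
        adjacent_tetrahedra) []]) []

-- ===== PORT B =====
-- buckets[i].append(x)  (i is always in range when B calls it)
def pvAppendAt (buckets : List (List Int)) (i : Nat) (x : Int) : List (List Int) :=
  match buckets, i with
  | [], _ => []
  | b :: bs, 0 => (b ++ [x]) :: bs
  | b :: bs, i + 1 => b :: pvAppendAt bs i x

def cluster_tetrahedra_by_point_alt (tetrahedra_quadruples : List (List Int)) (k : Int) : List (List Int) :=
  (PySem.List.enumerate tetrahedra_quadruples 1).foldl (fun buckets nq =>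
    (nq.2.take 4).foldl (fun buckets v =>
      if 1 ≤ v ∧ v ≤ k then pvAppendAt buckets (v - 1).toNat nq.1 else buckets) buckets)
    (List.replicate k.toNat [])

-- ===== PRECONDITION & SPEC =====
-- Pre_ excludes exactly the inputs on which A raises IndexError: k > 0 together with
-- some quadruple of fewer than 4 entries.
def Pre_cluster_tetrahedra_by_point (tetrahedra_quadruples : List (List Int)) (k : Int) : Prop :=
  0 < k → ∀ q ∈ tetrahedra_quadruples, 4 ≤ q.length
instance (tetrahedra_quadruples : List (List Int)) (k : Int) : Decidable (Pre_cluster_tetrahedra_by_point tetrahedra_quadruples k) := by unfold Pre_cluster_tetrahedra_by_point; infer_instance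
def pvWitness_cluster_tetrahedra_by_point : List (List Int) × Int := ([[1, 2, 3, 4], [2, 3, 4, 1]], 4)


def Spec_cluster_tetrahedra_by_point (tetrahedra_quadruples : List (List Int)) (k : Int) (out : List (List Int)) : Prop := out = cluster_tetrahedra_by_point_alt tetrahedra_quadruples k
instance (tetrahedra_quadruples : List (List Int)) (k : Int) (out : List (List Int)) : Decidable (Spec_cluster_tetrahedra_by_point tetrahedra_quadruples k out) := by unfold Spec_cluster_tetrahedra_by_point; infer_instance

-- ===== CLAIM (what is proved, stated in full; the proofs are below) =====
def Claim_equal_cluster_tetrahedra_by_point : Prop := ∀ (tetrahedra_quadruples : List (List Int)) (k : Int), Dom_cluster_tetrahedra_by_point tetrahedra_quadruples k → Pre_cluster_tetrahedra_by_point tetrahedra_quadruples k → Spec_cluster_tetrahedra_by_point tetrahedra_quadruples k (cluster_tetrahedra_by_point tetrahedra_quadruples k)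

-- ===== LEMMAS AND PROOFS =====

-- the bucket of grid point m+1: contributions of the numbered quadruples, in order
def pvContrib (m : Int) (ps : List (Int × List Int)) : List Int :=
  ps.flatMap (fun nq => (nq.2.take 4).filterMap (fun v => if v = m + 1 then some nq.1 else none))

theorem pvFlatMapMap {α β γ : Type} (l : List α) (f : α → β) (g : β → List γ) :
    (l.map f).flatMap g = l.flatMap (fun x => g (f x)) := by
  induction l with
  | nil => rfl
  | cons a l ih => simp [ih]

theorem pvEnumShift (xs : List (List Int)) : ∀ s : Int,
    PySem.List.enumerate xs (s + 1) = (PySem.List.enumerate xs s).map (fun p => (p.1 + 1, p.2)) := by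
  induction xs with
  | nil =>
    intro s
    simp [PySem.List.enumerate_nil]
  | cons x xs ih =>
    intro s
    rw [PySem.List.enumerate_cons, PySem.List.enumerate_cons, List.map_cons, ih (s + 1)]

theorem pvQuadFoldA (q : List Int) (h : 4 ≤ q.length) (m n : Int) (adj : List Int) :
    (PySem.List.pyRange 0 4 1).foldl (fun adj l =>
        if PySem.List.pyGetD q l 0 = m + 1 then adj ++ [n + 1] else adj) adj
      = adj ++ (q.take 4).filterMap (fun v => if v = m + 1 then some (n + 1) else none) := by
  match q, h with
  | a :: b :: c :: d :: t, _ =>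
    have hr : PySem.List.pyRange 0 4 1 = [0, 1, 2, 3] := by decide
    rw [hr]
    simp only [List.foldl_cons, List.foldl_nil]
    have g0 : PySem.List.pyGetD (a :: b :: c :: d :: t) 0 0 = a := by simp [pysem]
    have g1 : PySem.List.pyGetD (a :: b :: c :: d :: t) 1 0 = b := by simp [pysem]
    have g2 : PySem.List.pyGetD (a :: b :: c :: d :: t) 2 0 = c := by simp [pysem]
    have g3 : PySem.List.pyGetD (a :: b :: c :: d :: t) 3 0 = d := by simp [pysem]
    rw [g0, g1, g2, g3]
    split_ifs <;> simp_all

theorem pvAInner (tq : List (List Int)) (h : ∀ q ∈ tq, 4 ≤ q.length) (m : Int) :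
    (PySem.List.pyRange 0 (tq.length : Int) 1).foldl (fun adjacent_tetrahedra n =>
        (PySem.List.pyRange 0 4 1).foldl (fun adjacent_tetrahedra l =>
          if PySem.List.pyGetD (PySem.List.pyGetD tq n []) l 0 = m + 1
          then adjacent_tetrahedra ++ [n + 1] else adjacent_tetrahedra)
        adjacent_tetrahedra) []
      = pvContrib m (PySem.List.enumerate tq 1) := by
  have hcong : ∀ n ∈ PySem.List.pyRange 0 (tq.length : Int) 1, ∀ adj : List Int,
      (PySem.List.pyRange 0 4 1).foldl (fun adjacent_tetrahedra l =>
          if PySem.List.pyGetD (PySem.List.pyGetD tq n []) l 0 = m + 1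
          then adjacent_tetrahedra ++ [n + 1] else adjacent_tetrahedra) adj
        = adj ++ ((PySem.List.pyGetD tq n []).take 4).filterMap
            (fun v => if v = m + 1 then some (n + 1) else none) := by
    intro n hn adj
    have hb : 0 ≤ n ∧ n < (tq.length : Int) := by
      exact PySem.List.mem_pyRange_one.mp hn
    obtain ⟨hn0, hnlt⟩ := hb
    obtain ⟨jn, rfl⟩ : ∃ jn : Nat, n = (jn : Int) := ⟨n.toNat, (Int.toNat_of_nonneg hn0).symm⟩
    have hjlt : jn < tq.length := by exact_mod_cast hnlt
    have hq : PySem.List.pyGetD tq (jn : Int) [] = tq[jn] := by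
      rw [PySem.List.pyGetD_natCast]
      exact List.getD_eq_getElem tq [] hjlt
    rw [hq]
    exact pvQuadFoldA _ (h _ (List.getElem_mem hjlt)) m _ adj
  have hfold :
      (PySem.List.pyRange 0 (tq.length : Int) 1).foldl (fun adjacent_tetrahedra n =>
          (PySem.List.pyRange 0 4 1).foldl (fun adjacent_tetrahedra l =>
            if PySem.List.pyGetD (PySem.List.pyGetD tq n []) l 0 = m + 1
            then adjacent_tetrahedra ++ [n + 1] else adjacent_tetrahedra)
          adjacent_tetrahedra) []
        = (PySem.List.pyRange 0 (tq.length : Int) 1).foldl (fun adj n =>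
            adj ++ ((PySem.List.pyGetD tq n []).take 4).filterMap
              (fun v => if v = m + 1 then some (n + 1) else none)) [] := by
    exact PySem.List.foldl_congr_mem' _ _ _ _ hcong
  rw [hfold]
  rw [PySem.List.foldl_append_eq_flatMap
        (fun n : Int => ((PySem.List.pyGetD tq n []).take 4).filterMap
          (fun v => if v = m + 1 then some (n + 1) else none))
        (PySem.List.pyRange 0 (tq.length : Int) 1) []]
  have hshift : PySem.List.enumerate tq 1
      = (PySem.List.enumerate tq 0).map (fun p => (p.1 + 1, p.2)) := by
    simpa using pvEnumShift tq 0
  have he : PySem.List.enumerate tq 0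
      = (PySem.List.pyRange 0 (tq.length : Int) 1).map (fun j => (j, PySem.List.pyGetD tq j [])) := by
    simpa using PySem.List.enumerate_eq_map_pyRange (xs := tq) (d := ([] : List Int))
  simp only [List.nil_append, pvContrib, hshift, he, pvFlatMapMap]

theorem pvLenAppendAt (bs : List (List Int)) (i : Nat) (x : Int) :
    (pvAppendAt bs i x).length = bs.length := by
  induction bs generalizing i with
  | nil => simp [pvAppendAt]
  | cons b bs ih => cases i <;> simp [pvAppendAt, ih]

theorem pvGetAppendAt (bs : List (List Int)) (i : Nat) (x : Int) (j : Nat) :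
    (pvAppendAt bs i x)[j]? = if i = j then (bs[j]?).map (· ++ [x]) else bs[j]? := by
  induction bs generalizing i j with
  | nil => simp [pvAppendAt, ite_self]
  | cons b bs ih =>
    cases i with
    | zero => cases j <;> simp [pvAppendAt]
    | succ i =>
      cases j with
      | zero => simp [pvAppendAt]
      | succ j =>
        by_cases hij : i = j
        · subst hij; simp [pvAppendAt, ih]
        · simp [pvAppendAt, ih, hij]

theorem pvBQuad (vs : List Int) (n k : Int) (j : Nat) (hj : (j : Int) < k) :
    ∀ bs : List (List Int),
    (vs.foldl (fun bs v => if 1 ≤ v ∧ v ≤ k then pvAppendAt bs (v - 1).toNat n else bs) bs)[j]?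
      = (bs[j]?).map (· ++ vs.filterMap (fun v => if v = (j : Int) + 1 then some n else none)) := by
  induction vs with
  | nil =>
    intro bs
    cases hb : bs[j]? <;> simp [hb]
  | cons v vs ih =>
    intro bs
    rw [List.foldl_cons]
    by_cases hv : v = (j : Int) + 1
    · have hcond : 1 ≤ v ∧ v ≤ k := by omega
      rw [if_pos hcond, ih, pvGetAppendAt, if_pos (show (v - 1).toNat = j by omega)]
      cases hb : bs[j]? <;> simp [hv]
    · by_cases hcond : 1 ≤ v ∧ v ≤ k
      · rw [if_pos hcond, ih, pvGetAppendAt,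
          if_neg (show ¬ (v - 1).toNat = j by omega)]
        cases hb : bs[j]? <;> simp [hv]
      · rw [if_neg hcond, ih]
        cases hb : bs[j]? <;> simp [hv]

theorem pvBMain (k : Int) (j : Nat) (hj : (j : Int) < k) :
    ∀ (ps : List (Int × List Int)) (bs : List (List Int)),
    (ps.foldl (fun bs nq => (nq.2.take 4).foldl (fun bs v =>
        if 1 ≤ v ∧ v ≤ k then pvAppendAt bs (v - 1).toNat nq.1 else bs) bs) bs)[j]?
      = (bs[j]?).map (· ++ pvContrib (j : Int) ps) := by
  intro ps
  induction ps with
  | nil =>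
    intro bs
    cases hb : bs[j]? <;> simp [hb, pvContrib]
  | cons nq ps ih =>
    intro bs
    rw [List.foldl_cons, ih, pvBQuad _ _ _ _ hj]
    cases hb : bs[j]? <;> simp [pvContrib]

theorem pvBQuadLen (k n : Int) (vs : List Int) : ∀ bs : List (List Int),
    (vs.foldl (fun bs v => if 1 ≤ v ∧ v ≤ k then pvAppendAt bs (v - 1).toNat n else bs) bs).length
      = bs.length := by
  induction vs with
  | nil => intro bs; rfl
  | cons v vs ih =>
    intro bs
    rw [List.foldl_cons, ih]
    by_cases hc : 1 ≤ v ∧ v ≤ k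
    · rw [if_pos hc, pvLenAppendAt]
    · rw [if_neg hc]

theorem pvBLenMain (k : Int) : ∀ (ps : List (Int × List Int)) (bs : List (List Int)),
    (ps.foldl (fun bs nq => (nq.2.take 4).foldl (fun bs v =>
        if 1 ≤ v ∧ v ≤ k then pvAppendAt bs (v - 1).toNat nq.1 else bs) bs) bs).length
      = bs.length := by
  intro ps
  induction ps with
  | nil => intro bs; rfl
  | cons nq ps ih =>
    intro bs
    rw [List.foldl_cons, ih, pvBQuadLen]

-- ===== VERDICT (by name: the statement is the Claim_ definition above) =====
theorem cluster_tetrahedra_by_point_spec : Claim_equal_cluster_tetrahedra_by_point := by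
  intro tq k _ hpre
  unfold Spec_cluster_tetrahedra_by_point
  have hA : cluster_tetrahedra_by_point tq k
      = [] ++ (PySem.List.pyRange 0 k 1).map (fun m =>
          (PySem.List.pyRange 0 (tq.length : Int) 1).foldl (fun adjacent_tetrahedra n =>
            (PySem.List.pyRange 0 4 1).foldl (fun adjacent_tetrahedra l =>
              if PySem.List.pyGetD (PySem.List.pyGetD tq n []) l 0 = m + 1
              then adjacent_tetrahedra ++ [n + 1] else adjacent_tetrahedra)
            adjacent_tetrahedra) []) :=
    PySem.List.foldl_append_singleton_eq_map _ _ _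
  rw [hA, List.nil_append]
  have hBlen : (cluster_tetrahedra_by_point_alt tq k).length = k.toNat :=
    (pvBLenMain k (PySem.List.enumerate tq 1) (List.replicate k.toNat [])).trans (by simp)
  by_cases hk : k ≤ 0
  · rw [PySem.List.pyRange_one_eq_nil hk, List.map_nil]
    have hzero : (cluster_tetrahedra_by_point_alt tq k).length = 0 := by
      rw [hBlen]; omega
    exact (List.eq_nil_of_length_eq_zero hzero).symm
  · have hk' : 0 < k := by omega
    have h4 := hpre hk'
    have hlenA : (PySem.List.pyRange 0 k 1).length = k.toNat := by
      simp [PySem.List.length_pyRange_one]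
    refine List.ext_getElem (by rw [List.length_map, hlenA, hBlen]) ?_
    intro i h1 h2
    have hik : i < k.toNat := by
      rw [List.length_map, hlenA] at h1
      exact h1
    have hiI : (i : Int) < k := by omega
    have hBalt : (cluster_tetrahedra_by_point_alt tq k)[i]?
        = some (pvContrib (i : Int) (PySem.List.enumerate tq 1)) := by
      refine Eq.trans (pvBMain k i hiI (PySem.List.enumerate tq 1) (List.replicate k.toNat [])) ?_
      rw [List.getElem?_eq_getElem (by simpa using hik)]
      simp
    have hB : (cluster_tetrahedra_by_point_alt tq k)[i]
        = pvContrib (i : Int) (PySem.List.enumerate tq 1) := by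
      have h' := hBalt
      rw [List.getElem?_eq_getElem h2] at h'
      exact Option.some.inj h'
    simp only [List.getElem_map]
    rw [PySem.List.getElem_pyRange_one, zero_add, hB]
    exact pvAInner tq h4 i
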